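-- pv_equiv track=rewrite | github.com/HuangZiheng-o-O/db-fork-bench | util/sql_parse.py | _extract_main_statement_after_cte
-- ===== SOURCE A (Python) =====
-- def _extract_main_statement_after_cte(sql: str) -> str:
--     """
--     Extract the main statement after CTE (WITH clause) definitions.
--
--     For queries with CTEs, this function returns the primary SELECT/INSERT/UPDATE/DELETE
--     statement that follows the CTE definitions.
--
--     Example:
--         >>> extract_main_statement_after_cte("WITH cte AS (SELECT * FROM t) SELECT * FROM cte")
--         "SELECT * FROM cte"
--
--     Args:
--         sql: SQL statement potentially containing CTEs
--
--     Returns: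
--         Main statement after CTE definitions, or original SQL if no CTEs found
--     """
--     # Find the main statement keyword at depth 0 (outside of all parentheses)
--     depth = 0
--
--     for i, char in enumerate(sql):
--         if char == "(":
--             depth += 1
--         elif char == ")":
--             depth -= 1
--         elif depth == 0 and char not in (" ", "\t", "\n", ","):
--             # We're at depth 0 and hit a non-whitespace, non-comma character
--             # Check if this starts a main statement keyword
--             remaining = sql[i:].lstrip().upper()
--             if remaining.startswith(("SELECT", "INSERT", "UPDATE", "DELETE")):
--                 return sql[i:].lstrip()
--
--     # Fallback: return original if we can't parse it
--     return sql
-- ===== SOURCE B (Python) =====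
-- _KEYWORDS = ("SELECT", "INSERT", "UPDATE", "DELETE")
--
--
-- def _extract_main_statement_after_cte(sql: str) -> str:
--     """Collect every position where a main-statement keyword occurs with a
--     balanced parenthesis prefix, then return the suffix at the leftmost one."""
--     upper = sql.upper()
--     candidates = [
--         pos
--         for kw in _KEYWORDS
--         for pos in range(len(sql))
--         if upper[pos:pos + len(kw)] == kw
--         and sql[:pos].count("(") == sql[:pos].count(")")
--     ]
--     if not candidates:
--         return sql
--     return sql[min(candidates):]
-- ===== Notes on version B (the rewrite author's own statement) =====
-- stated objective: faster
-- what changed: Replaces A's single stateful scan (incremental paren depth, char-class filter, and a full lstrip().upper() of the remaining tail at every depth-0 character) by a candidate search: uppercase once, enumerate every keyword occurrence, keep those whose prefix holds equally many opening and closing parentheses, and slice at the minimum position.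
import Mathlib
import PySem

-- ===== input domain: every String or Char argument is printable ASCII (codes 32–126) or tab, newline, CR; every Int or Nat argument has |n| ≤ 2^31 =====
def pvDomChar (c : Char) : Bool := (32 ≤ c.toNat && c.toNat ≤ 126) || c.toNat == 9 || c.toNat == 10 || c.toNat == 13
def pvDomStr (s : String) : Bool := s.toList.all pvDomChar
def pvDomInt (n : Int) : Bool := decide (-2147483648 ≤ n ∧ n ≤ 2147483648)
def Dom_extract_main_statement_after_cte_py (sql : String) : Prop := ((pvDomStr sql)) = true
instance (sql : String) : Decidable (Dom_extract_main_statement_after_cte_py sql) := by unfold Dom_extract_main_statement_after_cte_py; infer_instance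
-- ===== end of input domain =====

-- B replaces A's single stateful scan (incremental depth, lstrip-based keyword test) by a
-- keyword-candidate search filtered by prefix parenthesis counts ('alternative'; equal return values).

-- ===== PORT A =====
-- `remaining.startswith(("SELECT", "INSERT", "UPDATE", "DELETE"))`
def pvKwCheckA (rem : List Char) : Bool :=
  PySem.Chars.startswith rem "SELECT".toList || PySem.Chars.startswith rem "INSERT".toList ||
  PySem.Chars.startswith rem "UPDATE".toList || PySem.Chars.startswith rem "DELETE".toList

-- the `for i, char in enumerate(sql)` loop; `none` = fell through (A then returns the original sql)
def pvLoopA (s : List Char) : List (Int × Char) → Int → Option (List Char)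
  | [], _ => none
  | (i, c) :: rest, depth =>
    if c = '(' then pvLoopA s rest (depth + 1)
    else if c = ')' then pvLoopA s rest (depth - 1)
    else if depth = 0 ∧ c ≠ ' ' ∧ c ≠ '\t' ∧ c ≠ '\n' ∧ c ≠ ',' then
      -- remaining = sql[i:].lstrip().upper(); if remaining.startswith(...): return sql[i:].lstrip()
      let stripped := PySem.Chars.lstrip (PySem.List.slice s (some i) none)
      if pvKwCheckA (PySem.Chars.upper stripped) then some stripped
      else pvLoopA s rest depth
    else pvLoopA s rest depth

def extract_main_statement_after_cte_py (sql : String) : String :=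
  match pvLoopA sql.toList (PySem.List.enumerate sql.toList) 0 with
  | some r => String.ofList r
  | none => sql

-- ===== PORT B =====
def pvKws : List (List Char) := ["SELECT".toList, "INSERT".toList, "UPDATE".toList, "DELETE".toList]

-- the candidate list comprehension of Source B
def pvCandsB (s : List Char) : List Nat :=
  pvKws.flatMap (fun kw =>
    (List.range s.length).filter (fun pos =>
      (PySem.List.slice (PySem.Chars.upper s) (some (pos : Int)) (some ((pos : Int) + (kw.length : Int))) == kw)
      && (PySem.Chars.count (PySem.List.slice s none (some (pos : Int))) ['('] ==
          PySem.Chars.count (PySem.List.slice s none (some (pos : Int))) [')'])))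

def extract_main_statement_after_cte_py_alt (sql : String) : String :=
  match PySem.List.min? (pvCandsB sql.toList) (fun x => x) with
  | some m => String.ofList (PySem.List.slice sql.toList (some (m : Int)) none)
  | none => sql

-- ===== PRECONDITION & SPEC =====
def Spec_extract_main_statement_after_cte_py (sql : String) (out : String) : Prop := out = extract_main_statement_after_cte_py_alt sql
instance (sql : String) (out : String) : Decidable (Spec_extract_main_statement_after_cte_py sql out) := by unfold Spec_extract_main_statement_after_cte_py; infer_instance

-- ===== CLAIM (what is proved, stated in full; the proofs are below) =====
def Claim_equal_extract_main_statement_after_cte_py : Prop := ∀ (sql : String), Dom_extract_main_statement_after_cte_py sql → Spec_extract_main_statement_after_cte_py sql (extract_main_statement_after_cte_py sql)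

-- ===== LEMMAS AND PROOFS =====

-- balanced-parenthesis prefix at position p
def pvBal (s : List Char) (p : Nat) : Prop := (s.take p).count '(' = (s.take p).count ')'

-- B's candidate condition, abstractly
def pvP (s : List Char) (p : Nat) : Prop :=
  p < s.length ∧ pvBal s p ∧ ∃ kw ∈ pvKws, kw <+: (PySem.Chars.upper s).drop p

-- A's trigger condition at index i
def pvT (s : List Char) (i : Nat) : Prop :=
  pvBal s i ∧ (∃ c, s[i]? = some c ∧ c ≠ ' ' ∧ c ≠ '\t' ∧ c ≠ '\n' ∧ c ≠ ',') ∧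
  pvKwCheckA (PySem.Chars.upper (PySem.Chars.lstrip (s.drop i))) = true

lemma pvCountGo (c : Char) : ∀ (l : List Char) (fuel acc : Nat), l.length ≤ fuel →
    PySem.Chars.count.go [c] fuel l acc = acc + l.count c := by
  intro l
  induction l with
  | nil => intro fuel acc _; cases fuel <;> simp [PySem.Chars.count.go]
  | cons h t ih =>
    intro fuel acc hf
    cases fuel with
    | zero => simp at hf
    | succ f =>
      have hlen : t.length ≤ f := by simpa using hf
      by_cases hc : c = h
      · subst hc
        have hgo : PySem.Chars.count.go [c] (f + 1) (c :: t) acc =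
            PySem.Chars.count.go [c] f t (acc + 1) := by
          simp [PySem.Chars.count.go]
        rw [hgo, ih f (acc + 1) hlen, List.count_cons_self]
        omega
      · have hpf : ([c].isPrefixOf (h :: t)) = false := by
          simp [List.isPrefixOf, hc]
        simp only [PySem.Chars.count.go, hpf, Bool.false_eq_true, if_false]
        rw [ih f acc hlen, List.count_cons]
        simp [Ne.symm hc]

lemma pvCountEq (l : List Char) (c : Char) : PySem.Chars.count l [c] = l.count c := by
  simp only [PySem.Chars.count, List.isEmpty_cons, Bool.false_eq_true, if_false]
  simpa using pvCountGo c l l.length 0 le_rfl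

lemma pvLstripEq (l : List Char) :
    PySem.Chars.lstrip l = l.drop (l.takeWhile PySem.Chars.isspace).length := by
  have h := List.drop_left (l₁ := l.takeWhile PySem.Chars.isspace) (l₂ := l.dropWhile PySem.Chars.isspace)
  rw [List.takeWhile_append_dropWhile] at h
  simpa [PySem.Chars.lstrip] using h.symm

lemma pvUpperSpace {c : Char} (h : PySem.Chars.isspace c = true) : PySem.Chars.upperChar c = c := by
  have hlow : PySem.Chars.islower c = false := by
    by_contra hl
    have hl' : PySem.Chars.islower c = true := by
      revert hl; cases PySem.Chars.islower c <;> simp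
    simp only [PySem.Chars.islower, Bool.and_eq_true, decide_eq_true_eq] at hl'
    obtain ⟨ha, hz⟩ := hl'
    rw [Char.le_def, UInt32.le_iff_toNat_le] at ha hz
    simp only [PySem.Chars.isspace, Bool.or_eq_true, Bool.and_eq_true, decide_eq_true_eq] at h
    have hv : c.toNat = c.val.toNat := rfl
    have h1 : ('a').val.toNat = 97 := rfl
    have h2 : ('z').val.toNat = 122 := rfl
    omega
  simp [PySem.Chars.upperChar, hlow]

-- a character whose uppercase starts one of the keywords is no whitespace, comma or paren
lemma pvHeadLetter {c : Char}
    (h : PySem.Chars.upperChar c = 'S' ∨ PySem.Chars.upperChar c = 'I' ∨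
         PySem.Chars.upperChar c = 'U' ∨ PySem.Chars.upperChar c = 'D') :
    PySem.Chars.isspace c = false ∧ c ≠ ',' ∧ c ≠ '(' ∧ c ≠ ')' := by
  refine ⟨?_, ?_, ?_, ?_⟩
  · by_contra hs
    have hs' : PySem.Chars.isspace c = true := by revert hs; cases PySem.Chars.isspace c <;> simp
    have hc := pvUpperSpace hs'
    rw [hc] at h
    rcases h with h | h | h | h <;> subst h <;> exact absurd hs' (by decide)
  · rintro rfl; revert h; decide
  · rintro rfl; revert h; decide
  · rintro rfl; revert h; decide

lemma pvKwCheck_iff (u : List Char) :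
    pvKwCheckA u = true ↔ ∃ kw ∈ pvKws, kw <+: u := by
  constructor
  · intro h
    simp only [pvKwCheckA, Bool.or_eq_true, PySem.Chars.startswith,
      List.isPrefixOf_iff_prefix] at h
    rcases h with ((h | h) | h) | h
    exacts [⟨_, by simp [pvKws], h⟩, ⟨_, by simp [pvKws], h⟩,
      ⟨_, by simp [pvKws], h⟩, ⟨_, by simp [pvKws], h⟩]
  · rintro ⟨kw, hkw, hpre⟩
    simp only [pvKws, List.mem_cons, List.not_mem_nil, or_false] at hkw
    simp only [pvKwCheckA, Bool.or_eq_true, PySem.Chars.startswith,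
      List.isPrefixOf_iff_prefix]
    rcases hkw with rfl | rfl | rfl | rfl <;> tauto

-- a keyword check on a string with a non-letter head fails
lemma pvKwCheck_head_false {c : Char} (rest : List Char)
    (h : PySem.Chars.upperChar c ≠ 'S' ∧ PySem.Chars.upperChar c ≠ 'I' ∧
         PySem.Chars.upperChar c ≠ 'U' ∧ PySem.Chars.upperChar c ≠ 'D')
    (hsp : PySem.Chars.isspace c = false) :
    pvKwCheckA (PySem.Chars.upper (PySem.Chars.lstrip (c :: rest))) = false := by
  have hl : PySem.Chars.lstrip (c :: rest) = c :: rest := by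
    simp [PySem.Chars.lstrip, hsp]
  rw [hl, ← Bool.not_eq_true, pvKwCheck_iff]
  rintro ⟨kw, hkw, hpre⟩
  have hup : PySem.Chars.upper (c :: rest) = PySem.Chars.upperChar c :: PySem.Chars.upper rest := rfl
  rw [hup] at hpre
  simp only [pvKws, List.mem_cons, List.not_mem_nil, or_false] at hkw
  rcases hkw with rfl | rfl | rfl | rfl
  · rw [show "SELECT".toList = 'S' :: "ELECT".toList from rfl, List.cons_prefix_cons] at hpre
    exact h.1 hpre.1.symm
  · rw [show "INSERT".toList = 'I' :: "NSERT".toList from rfl, List.cons_prefix_cons] at hpre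
    exact h.2.1 hpre.1.symm
  · rw [show "UPDATE".toList = 'U' :: "PDATE".toList from rfl, List.cons_prefix_cons] at hpre
    exact h.2.2.1 hpre.1.symm
  · rw [show "DELETE".toList = 'D' :: "ELETE".toList from rfl, List.cons_prefix_cons] at hpre
    exact h.2.2.2 hpre.1.symm

lemma pvP_head {s : List Char} {q : Nat} (h : pvP s q) :
    ∃ c, s[q]? = some c ∧
      (PySem.Chars.upperChar c = 'S' ∨ PySem.Chars.upperChar c = 'I' ∨
       PySem.Chars.upperChar c = 'U' ∨ PySem.Chars.upperChar c = 'D') := by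
  obtain ⟨hq, _, kw, hkw, hpre⟩ := h
  obtain ⟨t, ht⟩ := hpre
  have hu : ((PySem.Chars.upper s).drop q)[0]? = kw[0]? := by
    rw [← ht]
    cases kw with
    | nil => simp [pvKws] at hkw
    | cons a l => simp
  rw [List.getElem?_drop] at hu
  simp only [PySem.Chars.upper, List.getElem?_map, Nat.add_zero] at hu
  rw [List.getElem?_eq_getElem hq] at hu
  refine ⟨s[q], by simp [hq], ?_⟩
  simp only [pvKws, List.mem_cons, List.not_mem_nil, or_false] at hkw
  rcases hkw with rfl | rfl | rfl | rfl <;> simp at hu <;> simp [hu]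

-- membership in B's candidate list
lemma pvMemCands {s : List Char} {p : Nat} : p ∈ pvCandsB s ↔ pvP s p := by
  simp only [pvCandsB, List.mem_flatMap, List.mem_filter, List.mem_range,
    Bool.and_eq_true, beq_iff_eq, PySem.List.slice_natCast_add, PySem.List.slice_to_natCast]
  constructor
  · rintro ⟨kw, hkw, hp, hsl, hcnt⟩
    rw [pvCountEq, pvCountEq] at hcnt
    refine ⟨hp, hcnt, kw, hkw, ?_⟩
    rw [List.prefix_iff_eq_take]
    exact hsl.symm
  · rintro ⟨hp, hbal, kw, hkw, hpre⟩
    refine ⟨kw, hkw, hp, (List.prefix_iff_eq_take.mp hpre).symm, ?_⟩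
    rw [pvCountEq, pvCountEq]
    exact hbal

-- (a) a B-candidate position triggers A's check
lemma pvP_T {s : List Char} {q : Nat} (h : pvP s q) : pvT s q := by
  obtain ⟨c, hc, hlet⟩ := pvP_head h
  obtain ⟨hsp, hcomma, hop, hcl⟩ := pvHeadLetter hlet
  obtain ⟨hq, hbal, kw, hkw, hpre⟩ := h
  have hcv : s[q] = c := by
    rw [List.getElem?_eq_getElem hq] at hc; exact Option.some.inj hc
  have hdrop : s.drop q = c :: s.drop (q + 1) := by
    rw [List.drop_eq_getElem_cons hq, hcv]
  have hstrip : PySem.Chars.lstrip (s.drop q) = s.drop q := by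
    rw [hdrop]; simp [PySem.Chars.lstrip, hsp]
  refine ⟨hbal, ⟨c, hc, ?_, ?_, ?_, hcomma⟩, ?_⟩
  · rintro rfl; simp [PySem.Chars.isspace] at hsp
  · rintro rfl; simp [PySem.Chars.isspace] at hsp
  · rintro rfl; simp [PySem.Chars.isspace] at hsp
  · rw [hstrip, pvKwCheck_iff]
    exact ⟨kw, hkw, by rwa [PySem.Chars.upper, List.map_drop]⟩

-- (b) A's trigger at i yields a B-candidate where the leading whitespace ends
lemma pvT_P {s : List Char} {i : Nat} (h : pvT s i) :
    pvP s (i + ((s.drop i).takeWhile PySem.Chars.isspace).length) ∧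
    PySem.Chars.lstrip (s.drop i) = s.drop (i + ((s.drop i).takeWhile PySem.Chars.isspace).length) := by
  obtain ⟨hbal, -, hkw⟩ := h
  set w := ((s.drop i).takeWhile PySem.Chars.isspace).length with hw
  have hstrip : PySem.Chars.lstrip (s.drop i) = s.drop (i + w) := by
    rw [pvLstripEq, List.drop_drop, ← hw]
  rw [hstrip, pvKwCheck_iff] at hkw
  obtain ⟨kw, hkwm, hpre⟩ := hkw
  have hkwne : kw ≠ [] := by
    simp only [pvKws, List.mem_cons, List.not_mem_nil, or_false] at hkwm
    rcases hkwm with rfl|rfl|rfl|rfl <;> simp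
  have hupre : kw <+: (PySem.Chars.upper s).drop (i + w) := by
    rwa [PySem.Chars.upper, List.map_drop] at hpre
  have hlen : i + w < s.length := by
    have h1 := List.IsPrefix.length_le hupre
    have h2 : ((PySem.Chars.upper s).drop (i + w)).length = s.length - (i + w) := by
      simp [PySem.Chars.upper]
    have h3 : 0 < kw.length := List.length_pos_iff.mpr hkwne
    omega
  refine ⟨⟨hlen, ?_, kw, hkwm, hupre⟩, hstrip⟩
  have htw : (s.drop i).take w = (s.drop i).takeWhile PySem.Chars.isspace := by
    rw [hw]; exact (List.prefix_iff_eq_take.mp (List.takeWhile_prefix _)).symm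
  have hsplit : s.take (i + w) = s.take i ++ (s.drop i).take w := List.take_add
  have hzero : ∀ d : Char, PySem.Chars.isspace d = false → ((s.drop i).take w).count d = 0 := by
    intro d hd
    rw [htw, List.count_eq_zero]
    intro hmem
    have := List.mem_takeWhile_imp hmem
    rw [hd] at this
    exact Bool.noConfusion this
  unfold pvBal
  rw [hsplit, List.count_append, List.count_append,
    hzero '(' (by decide), hzero ')' (by decide)]
  simpa using hbal

-- positions strictly inside the skipped whitespace hold whitespace characters
lemma pvWs_mem {s : List Char} {i q : Nat} (hle : i ≤ q)
    (hlt : q < i + ((s.drop i).takeWhile PySem.Chars.isspace).length) :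
    ∃ c, s[q]? = some c ∧ PySem.Chars.isspace c = true := by
  set tw := (s.drop i).takeWhile PySem.Chars.isspace with htw
  have hq : q - i < tw.length := by omega
  have hpre : tw <+: s.drop i := List.takeWhile_prefix _
  have hlen : q - i < (s.drop i).length := lt_of_lt_of_le hq (List.IsPrefix.length_le hpre)
  have hql : q < s.length := by simp at hlen; omega
  have hget : tw[q - i]'hq = (s.drop i)[q - i]'hlen := List.IsPrefix.getElem hpre hq
  have hsp := List.mem_takeWhile_imp (List.getElem_mem hq)
  refine ⟨s[q], by simp [hql], ?_⟩
  have heq : (s.drop i)[q - i]'hlen = s[q]'hql := by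
    rw [List.getElem_drop]
    congr 1; omega
  rw [hget, heq] at hsp
  exact hsp

-- A's trigger needs an in-range index
lemma pvT_lt {s : List Char} {j : Nat} (h : pvT s j) : j < s.length := by
  obtain ⟨-, ⟨c, hc, -⟩, -⟩ := h
  by_contra hj
  rw [List.getElem?_eq_none (by omega)] at hc
  cases hc

-- the main loop invariant for A
lemma pvLoopA_cases (s : List Char) : ∀ (k i : Nat) (d : Int), i + k = s.length →
    d = ((s.take i).count '(' : Int) - ((s.take i).count ')' : Int) →
    (pvLoopA s (PySem.List.enumerate (s.drop i) (i : Int)) d = none ∧ ∀ j, i ≤ j → ¬ pvT s j)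
    ∨ (∃ m, i ≤ m ∧ pvT s m ∧ (∀ j, i ≤ j → j < m → ¬ pvT s j) ∧
        pvLoopA s (PySem.List.enumerate (s.drop i) (i : Int)) d = some (PySem.Chars.lstrip (s.drop m))) := by
  intro k
  induction k with
  | zero =>
    intro i d hik hd
    left
    constructor
    · rw [List.drop_of_length_le (by omega)]
      simp [PySem.List.enumerate, pvLoopA]
    · intro j hj hT
      have := pvT_lt hT
      omega
  | succ k ih =>
    intro i d hik hd
    have hi : i < s.length := by omega
    have hdrop : s.drop i = s[i] :: s.drop (i + 1) := List.drop_eq_getElem_cons hi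
    have henum : PySem.List.enumerate (s.drop i) (i : Int) =
        ((i : Int), s[i]) :: PySem.List.enumerate (s.drop (i + 1)) ((i + 1 : Nat) : Int) := by
      rw [hdrop, PySem.List.enumerate_cons]; push_cast; ring_nf
    set c := s[i] with hc
    have htake : s.take (i + 1) = s.take i ++ [c] := by
      rw [List.take_add_one, List.getElem?_eq_getElem hi]; rfl
    have hballt : pvBal s i ↔ d = 0 := by
      unfold pvBal; omega
    -- lift the induction hypothesis from i+1 to i, given ¬ pvT s i
    have lift : ∀ d' : Int, d' = ((s.take (i+1)).count '(' : Int) - ((s.take (i+1)).count ')' : Int) →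
        ¬ pvT s i →
        (pvLoopA s (PySem.List.enumerate (s.drop (i+1)) ((i+1 : Nat) : Int)) d' = none ∧ ∀ j, i ≤ j → ¬ pvT s j)
        ∨ (∃ m, i ≤ m ∧ pvT s m ∧ (∀ j, i ≤ j → j < m → ¬ pvT s j) ∧
            pvLoopA s (PySem.List.enumerate (s.drop (i+1)) ((i+1 : Nat) : Int)) d' = some (PySem.Chars.lstrip (s.drop m))) := by
      intro d' hd' hnT
      rcases ih (i + 1) d' (by omega) hd' with ⟨hval, hall⟩ | ⟨m, hm, hTm, hmin, hval⟩
      · left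
        refine ⟨hval, fun j hj hT => ?_⟩
        rcases Nat.eq_or_lt_of_le hj with rfl | hj'
        · exact hnT hT
        · exact hall j hj' hT
      · right
        refine ⟨m, by omega, hTm, fun j hj hjm => ?_, hval⟩
        rcases Nat.eq_or_lt_of_le hj with rfl | hj'
        · exact hnT
        · exact hmin j hj' hjm
    rw [henum]
    by_cases hop : c = '('
    · rw [pvLoopA, if_pos hop]
      have hd' : d + 1 = ((s.take (i+1)).count '(' : Int) - ((s.take (i+1)).count ')' : Int) := by
        rw [htake]
        simp [List.count_append, hop]
        omega
      refine lift (d + 1) hd' ?_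
      rintro ⟨-, -, hkw⟩
      rw [hdrop, hop] at hkw
      rw [pvKwCheck_head_false _ (by decide) (by decide)] at hkw
      exact Bool.noConfusion hkw
    · rw [pvLoopA, if_neg hop]
      by_cases hcl : c = ')'
      · rw [if_pos hcl]
        have hd' : d - 1 = ((s.take (i+1)).count '(' : Int) - ((s.take (i+1)).count ')' : Int) := by
          rw [htake]
          simp [List.count_append, hcl]
          omega
        refine lift (d - 1) hd' ?_
        rintro ⟨-, -, hkw⟩
        rw [hdrop, hcl] at hkw
        rw [pvKwCheck_head_false _ (by decide) (by decide)] at hkw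
        exact Bool.noConfusion hkw
      · have hd' : d = ((s.take (i+1)).count '(' : Int) - ((s.take (i+1)).count ')' : Int) := by
          rw [htake]
          simp [List.count_append, hop, hcl]
          omega
        rw [if_neg hcl]
        by_cases hcond : d = 0 ∧ c ≠ ' ' ∧ c ≠ '\t' ∧ c ≠ '\n' ∧ c ≠ ','
        · rw [if_pos hcond]
          have hsl : PySem.List.slice s (some (i : Int)) none = s.drop i :=
            PySem.List.slice_from_natCast s i
          by_cases hkw : pvKwCheckA (PySem.Chars.upper (PySem.Chars.lstrip (s.drop i))) = true
          · right
            refine ⟨i, le_rfl, ?_, fun j hj hji => absurd (lt_of_le_of_lt hj hji) (lt_irrefl i), ?_⟩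
            · exact ⟨hballt.mpr hcond.1, ⟨c, by rw [List.getElem?_eq_getElem hi], hcond.2.1,
                hcond.2.2.1, hcond.2.2.2.1, hcond.2.2.2.2⟩, hkw⟩
            · simp only [hsl, hkw, if_true]
          · simp only [hsl, hkw, Bool.false_eq_true, if_false]
            refine lift d hd' ?_
            rintro ⟨-, -, hk⟩
            exact hkw hk
        · rw [if_neg hcond]
          refine lift d hd' ?_
          rintro ⟨hbal', ⟨c', hc', h1, h2, h3, h4⟩, -⟩
          have : c' = c := by
            rw [List.getElem?_eq_getElem hi] at hc'
            exact (Option.some.inj hc').symm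
          subst this
          exact hcond ⟨hballt.mp hbal', h1, h2, h3, h4⟩

-- ===== VERDICT (by name: the statement is the Claim_ definition above) =====
theorem extract_main_statement_after_cte_py_spec : Claim_equal_extract_main_statement_after_cte_py := by
  intro sql _
  unfold Spec_extract_main_statement_after_cte_py
  unfold extract_main_statement_after_cte_py extract_main_statement_after_cte_py_alt
  set s := sql.toList with hs
  have hstart : PySem.List.enumerate s = PySem.List.enumerate (s.drop 0) ((0 : Nat) : Int) := by
    simp
  rcases pvLoopA_cases s s.length 0 0 (by omega) (by simp) with ⟨hval, hall⟩ | ⟨m, -, hT, hmin, hval⟩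
  · rw [hstart, hval]
    have hcands : pvCandsB s = [] := by
      rw [List.eq_nil_iff_forall_not_mem]
      intro p hp
      exact hall p (Nat.zero_le p) (pvP_T (pvMemCands.mp hp))
    rw [hcands]
    rfl
  · rw [hstart, hval]
    obtain ⟨hP', hstrip⟩ := pvT_P hT
    set w := ((s.drop m).takeWhile PySem.Chars.isspace).length with hw
    have hmem : m + w ∈ pvCandsB s := pvMemCands.mpr hP'
    cases hq : PySem.List.min? (pvCandsB s) (fun x => x) with
    | none =>
      rw [(PySem.List.min?_eq_none_iff _ _).mp hq] at hmem
      exact absurd hmem (List.not_mem_nil)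
    | some q =>
      have hqP : pvP s q := pvMemCands.mp (PySem.List.min?_mem hq)
      have hq1 : q ≤ m + w := PySem.List.min?_isMin hq _ hmem
      have hq2 : m ≤ q := by
        by_contra hcon
        exact hmin q (Nat.zero_le q) (by omega) (pvP_T hqP)
      have hq3 : m + w ≤ q := by
        by_contra hcon
        obtain ⟨cw, hcw, hcsp⟩ := pvWs_mem (s := s) hq2 (by omega)
        obtain ⟨cl, hcl, hlet⟩ := pvP_head hqP
        have : cw = cl := by rw [hcw] at hcl; exact Option.some.inj hcl
        subst this
        rw [(pvHeadLetter hlet).1] at hcsp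
        exact Bool.noConfusion hcsp
      have hqe : q = m + w := by omega
      rw [hstrip, hqe]
      show String.ofList (s.drop (m + w)) = String.ofList (PySem.List.slice s (some ((m + w : Nat) : Int)) none)
      rw [PySem.List.slice_from_natCast]
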